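-- pv_equiv track=rewrite | github.com/josemoreira15/SPLN2324 | TPC2/P1/word_freq/__init__.py | case_insensitive
-- ===== SOURCE A (Python) =====
-- def case_insensitive(content):
--     ci = dict()
--     for key, value in content:
--         up = key.upper()
--         if up not in ci:
--             ci[up] = 0
--         ci[up] += value
--
--     return ci
-- ===== SOURCE B (Python) =====
-- def case_insensitive(content):
--     # Two-pass: dedup the uppercased keys in first-occurrence order, then
--     # build the result with one per-key summation pass (instead of A's
--     # incremental dict accumulation).
--     order = list(dict.fromkeys(k.upper() for k, _ in content))
--     return {u: sum(v for k, v in content if k.upper() == u) for u in order}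
-- ===== Notes on version B (the rewrite author's own statement) =====
-- stated objective: alternative
-- what changed: Replaces A's single-pass incremental dict accumulation with a two-pass scheme: first dedup the uppercased keys in first-occurrence order, then build the result via one summation pass per distinct key.
import Mathlib
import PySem

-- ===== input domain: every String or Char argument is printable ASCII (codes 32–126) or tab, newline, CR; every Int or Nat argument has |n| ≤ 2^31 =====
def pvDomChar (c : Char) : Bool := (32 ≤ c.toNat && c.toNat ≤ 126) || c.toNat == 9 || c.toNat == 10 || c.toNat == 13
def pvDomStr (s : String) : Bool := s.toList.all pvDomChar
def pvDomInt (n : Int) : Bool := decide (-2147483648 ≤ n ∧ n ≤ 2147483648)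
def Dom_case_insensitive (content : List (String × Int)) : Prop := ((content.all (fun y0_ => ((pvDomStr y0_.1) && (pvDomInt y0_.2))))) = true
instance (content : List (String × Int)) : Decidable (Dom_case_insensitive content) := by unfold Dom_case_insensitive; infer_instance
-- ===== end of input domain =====

-- B replaces A's incremental dict accumulation by a dedup-then-sum-per-key pass (alternative decomposition, same results).

-- ===== PORT A =====
def case_insensitive (content : List (String × Int)) : List (String × Int) :=
  (content.foldl (fun ci p =>
      let up := PySem.Str.upper p.1
      let ci1 := if ci.contains up then ci else ci.insert up 0
      ci1.insert up (ci1.getD up 0 + p.2))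
    PySem.Dict.empty).items

-- ===== PORT B =====
def case_insensitive_alt (content : List (String × Int)) : List (String × Int) :=
  let order := PySem.List.dedup (content.map (fun p => PySem.Str.upper p.1))
  order.map (fun u =>
    (u, ((content.filter (fun p => PySem.Str.upper p.1 == u)).map (fun p => p.2)).sum))

-- ===== PRECONDITION & SPEC =====
def Spec_case_insensitive (content : List (String × Int)) (out : List (String × Int)) : Prop := out = case_insensitive_alt content
instance (content : List (String × Int)) (out : List (String × Int)) : Decidable (Spec_case_insensitive content out) := by unfold Spec_case_insensitive; infer_instance

-- ===== CLAIM (what is proved, stated in full; the proofs are below) =====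
def Claim_equal_case_insensitive : Prop := ∀ (content : List (String × Int)), Dom_case_insensitive content → Spec_case_insensitive content (case_insensitive content)

-- ===== LEMMAS AND PROOFS =====

-- A's loop body (setdefault-to-0 then +=) is exactly Dict.modify with default 0.
lemma step_eq_modify (d : PySem.Dict String Int) (p : String × Int) :
    (let up := PySem.Str.upper p.1
     let ci1 := if d.contains up then d else d.insert up 0
     ci1.insert up (ci1.getD up 0 + p.2)) = d.modify (PySem.Str.upper p.1) 0 (· + p.2) := by
  by_cases h : d.contains (PySem.Str.upper p.1) = true
  · simp [h, PySem.Dict.modify]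
  · have h' : d.contains (PySem.Str.upper p.1) = false := by simpa using h
    simp [PySem.Dict.modify, h', PySem.Dict.getD_of_not_contains d 0 h',
      PySem.Dict.getD_insert_self, PySem.Dict.insert_insert_self]

-- A's whole loop is the modify-accumulation loop.
lemma foldA_eq_foldl_modify (l : List (String × Int)) (d : PySem.Dict String Int) :
    l.foldl (fun ci p =>
        let up := PySem.Str.upper p.1
        let ci1 := if ci.contains up then ci else ci.insert up 0
        ci1.insert up (ci1.getD up 0 + p.2)) d
      = l.foldl (fun d p => d.modify (PySem.Str.upper p.1) 0 (· + p.2)) d := by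
  induction l generalizing d with
  | nil => rfl
  | cons p t ih =>
      simp only [List.foldl_cons]
      rw [step_eq_modify, ih]

-- Lookup after the modify-accumulation loop: initial value plus the sum of this key's values.
lemma getD_foldl_modify_add (l : List (String × Int)) (d : PySem.Dict String Int) (c : String) :
    (l.foldl (fun d p => d.modify (PySem.Str.upper p.1) 0 (· + p.2)) d).getD c 0
      = d.getD c 0 + ((l.filter (fun p => PySem.Str.upper p.1 == c)).map (fun p => p.2)).sum := by
  induction l generalizing d with
  | nil => simp
  | cons p t ih =>
      simp only [List.foldl_cons, List.filter_cons, ih]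
      by_cases h : PySem.Str.upper p.1 = c
      · simp [h, PySem.Dict.getD_modify_self]
        ring
      · simp [h, PySem.Dict.getD_modify_of_ne d 0 (· + p.2) (Ne.symm h)]

-- ===== VERDICT (by name: the statement is the Claim_ definition above) =====
theorem case_insensitive_spec : Claim_equal_case_insensitive := by
  intro content _
  show case_insensitive content = case_insensitive_alt content
  unfold case_insensitive case_insensitive_alt
  rw [foldA_eq_foldl_modify]
  have hnd : (content.foldl (fun d p => d.modify (PySem.Str.upper p.1) 0 (· + p.2))
      PySem.Dict.empty).keys.Nodup :=
    PySem.Dict.nodup_keys_foldl_modify_key content (fun p => PySem.Str.upper p.1) 0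
      (fun _ p => (· + p.2)) PySem.Dict.empty PySem.Dict.nodup_keys_empty
  rw [PySem.Dict.items_eq_map_keys _ hnd 0,
      PySem.Dict.keys_foldl_modify_key content (fun p => PySem.Str.upper p.1) 0
        (fun _ p => (· + p.2)) PySem.Dict.empty]
  have hupd : PySem.Set.update (PySem.Dict.empty : PySem.Dict String Int).keys
      (content.map (fun p => PySem.Str.upper p.1))
      = PySem.List.dedup (content.map (fun p => PySem.Str.upper p.1)) := by
    rw [PySem.List.dedup_eq_ofList, PySem.Set.ofList_eq_foldl]
    rfl
  rw [hupd]
  refine List.map_congr_left ?_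
  intro u _
  rw [getD_foldl_modify_add]
  simp
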